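-- pv_equiv track=rewrite | github.com/lentil32/python-streamlit-demos | pregexy/pregexy.py | compress_expression
-- ===== SOURCE A (Python) =====
-- DOT = "."
--
-- STAR = "*"
--
-- def compress_expression(p) -> str:
--     res = ""
--     prev = ""
--     i = 0
--     while i < len(p):
--         if i == len(p) - 1 or p[i + 1] != STAR:
--             res += p[i]
--             prev = ""
--             i += 1
--         else:
--             if prev != DOT:
--                 if p[i] == DOT:
--                     prev = DOT
--                     res += ".*"
--                 elif p[i] != prev:
--                     res += f"{p[i]}*"
--                     prev = p[i]
--             i += 2
--     return res
-- ===== SOURCE B (Python) =====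
-- DOT = "."
--
-- def compress_expression(p) -> str:
--     # pass 1: tokenize into (char, starred) pairs
--     tokens = []
--     i = 0
--     n = len(p)
--     while i < n:
--         if i + 1 < n and p[i + 1] == "*":
--             tokens.append((p[i], True))
--             i += 2
--         else:
--             tokens.append((p[i], False))
--             i += 1
--     # pass 2: fold over tokens collapsing duplicate starred runs
--     out = []
--     prev = ""
--     for ch, starred in tokens:
--         if not starred:
--             out.append(ch)
--             prev = ""
--         elif prev != DOT:
--             if ch == DOT:
--                 prev = DOT
--                 out.append(".*")
--             elif ch != prev:
--                 out.append(ch + "*")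
--                 prev = ch
--     return "".join(out)
-- ===== Notes on version B (the rewrite author's own statement) =====
-- stated objective: faster
-- what changed: A's single index-stepping while-loop building the result by repeated string concatenation is split into two passes: a tokenizer producing (char, starred) pairs, then a fold over the token list collapsing starred runs, collecting pieces in a list joined once.
import Mathlib
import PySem

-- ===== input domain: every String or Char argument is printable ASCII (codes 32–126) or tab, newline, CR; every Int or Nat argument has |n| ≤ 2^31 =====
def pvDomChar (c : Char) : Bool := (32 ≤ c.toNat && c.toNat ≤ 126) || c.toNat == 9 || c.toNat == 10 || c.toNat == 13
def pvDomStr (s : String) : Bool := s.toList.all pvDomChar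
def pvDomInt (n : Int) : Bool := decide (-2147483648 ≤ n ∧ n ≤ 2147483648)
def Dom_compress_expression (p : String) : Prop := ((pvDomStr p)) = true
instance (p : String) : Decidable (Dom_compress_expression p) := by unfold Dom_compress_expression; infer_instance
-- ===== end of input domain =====

-- B replaces A's single index-stepping while-loop by two passes — a tokenizer
-- producing (char, starred) pairs, then a fold collapsing starred runs — with one join at the end
-- (objective: faster; A rebuilds res by repeated string concatenation, B joins once).

-- ===== PORT A =====
-- A's while-loop: one recursion over the character list, carrying prev; `i += 2`
-- becomes dropping the '*' via rest.tail.
def pvLoopA : List Char → String → String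
  | [], _ => ""
  | c :: rest, prev =>
    if rest.head? ≠ some '*' then
      -- i == len(p) - 1 or p[i+1] != STAR
      String.singleton c ++ pvLoopA rest ""
    else
      (if prev ≠ "." then
        if c = '.' then ".*" ++ pvLoopA rest.tail "."
        else if String.singleton c ≠ prev then
          String.singleton c ++ "*" ++ pvLoopA rest.tail (String.singleton c)
        else pvLoopA rest.tail prev
      else pvLoopA rest.tail prev)
  termination_by l => l.length
  decreasing_by all_goals cases rest <;> simp_all

def compress_expression (p : String) : String := pvLoopA p.toList ""

-- ===== PORT B =====
-- pass 1 of Source B: tokenize into (char, starred) pairs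
def pvTokenize : List Char → List (Char × Bool)
  | [] => []
  | c :: rest =>
    if rest.head? = some '*' then (c, true) :: pvTokenize rest.tail
    else (c, false) :: pvTokenize rest
  termination_by l => l.length
  decreasing_by all_goals cases rest <;> simp_all

-- pass 2 of Source B: fold over tokens, collapsing duplicate starred runs
def pvFoldTok : List (Char × Bool) → String → String
  | [], _ => ""
  | (c, false) :: ts, _ => String.singleton c ++ pvFoldTok ts ""
  | (c, true) :: ts, prev =>
    if prev ≠ "." then
      if c = '.' then ".*" ++ pvFoldTok ts "."
      else if String.singleton c ≠ prev then
        String.singleton c ++ "*" ++ pvFoldTok ts (String.singleton c)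
      else pvFoldTok ts prev
    else pvFoldTok ts prev

def compress_expression_alt (p : String) : String := pvFoldTok (pvTokenize p.toList) ""

-- ===== PRECONDITION & SPEC =====
def Spec_compress_expression (p : String) (out : String) : Prop := out = compress_expression_alt p
instance (p : String) (out : String) : Decidable (Spec_compress_expression p out) := by unfold Spec_compress_expression; infer_instance

-- ===== CLAIM (what is proved, stated in full; the proofs are below) =====
def Claim_equal_compress_expression : Prop := ∀ (p : String), Dom_compress_expression p → Spec_compress_expression p (compress_expression p)

-- ===== LEMMAS AND PROOFS =====
theorem pvLoopA_eq_foldTok_tokenize (l : List Char) (prev : String) :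
    pvLoopA l prev = pvFoldTok (pvTokenize l) prev := by
  fun_induction pvLoopA l prev with
  | case1 => simp [pvTokenize, pvFoldTok]
  | case2 c rest prev h ih =>
      rw [pvTokenize, if_neg h, pvFoldTok, ih]
  | case3 rest prev h1 h2 ih =>
      rw [pvTokenize, if_pos (not_not.mp h1), pvFoldTok, if_pos h2, if_pos rfl, ih]
  | case4 c rest prev h1 h2 h3 h4 ih =>
      rw [pvTokenize, if_pos (not_not.mp h1), pvFoldTok, if_pos h2, if_neg h3, if_pos h4, ih]
  | case5 c rest prev h1 h2 h3 h4 ih =>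
      rw [pvTokenize, if_pos (not_not.mp h1), pvFoldTok, if_pos h2, if_neg h3, if_neg h4, ih]
  | case6 c rest prev h1 h2 ih =>
      rw [pvTokenize, if_pos (not_not.mp h1), pvFoldTok, if_neg h2, ih]

-- ===== VERDICT (by name: the statement is the Claim_ definition above) =====
theorem compress_expression_spec : Claim_equal_compress_expression := by
  intro p _
  unfold Spec_compress_expression compress_expression compress_expression_alt
  exact pvLoopA_eq_foldTok_tokenize _ _
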